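-- pv_equiv track=rewrite | github.com/jonzo97/mchp-datasheet-review | src/changes_diff.py | _format_table_issues
-- ===== SOURCE A (Python) =====
-- from typing import Dict, List, Tuple
--
-- def _format_table_issues(issues: List[Dict]) -> str:
--     """Format table and figure issues."""
--     if not issues:
--         return ""
--
--     # Categorize by severity
--     high_severity = [i for i in issues if i.get('severity') == 'high']
--     medium_severity = [i for i in issues if i.get('severity') == 'medium']
--     low_severity = [i for i in issues if i.get('severity') == 'low']
--
--     lines = ["## Tables & Figures Issues", ""]
--     lines.append(f"**Total Issues:** {len(issues)}\n")
--
--     if high_severity: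
--         lines.append(f"**High Severity:** {len(high_severity)}")
--         examples = high_severity[:3]
--         for ex in examples:
--             lines.append(f"  - {ex.get('description', 'Unknown issue')}")
--
--     if medium_severity:
--         lines.append(f"**Medium Severity:** {len(medium_severity)}")
--
--     if low_severity:
--         lines.append(f"**Low Severity:** {len(low_severity)}")
--
--     lines.append("\n---\n")
--     return "\n".join(lines)
-- ===== SOURCE B (Python) =====
-- def _format_table_issues(issues):
--     """Format table and figure issues (single pass with counters)."""
--     if not issues:
--         return ""
--
--     high = med = low = 0
--     high_examples = []
--     for i in issues:
--         s = i.get('severity')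
--         if s == 'high':
--             high += 1
--             if len(high_examples) < 3:
--                 high_examples.append(i.get('description', 'Unknown issue'))
--         elif s == 'medium':
--             med += 1
--         elif s == 'low':
--             low += 1
--
--     lines = ["## Tables & Figures Issues", "", f"**Total Issues:** {len(issues)}\n"]
--     if high:
--         lines.append(f"**High Severity:** {high}")
--         for d in high_examples:
--             lines.append(f"  - {d}")
--     if med:
--         lines.append(f"**Medium Severity:** {med}")
--     if low:
--         lines.append(f"**Low Severity:** {low}")
--     lines.append("\n---\n")
--     return "\n".join(lines)
-- ===== Notes on version B (the rewrite author's own statement) =====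
-- stated objective: alternative
-- what changed: Replaces A's three independent filter passes over issues with a single loop that maintains three severity counters and a bounded (max 3) list of high-severity example descriptions.
import Mathlib
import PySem

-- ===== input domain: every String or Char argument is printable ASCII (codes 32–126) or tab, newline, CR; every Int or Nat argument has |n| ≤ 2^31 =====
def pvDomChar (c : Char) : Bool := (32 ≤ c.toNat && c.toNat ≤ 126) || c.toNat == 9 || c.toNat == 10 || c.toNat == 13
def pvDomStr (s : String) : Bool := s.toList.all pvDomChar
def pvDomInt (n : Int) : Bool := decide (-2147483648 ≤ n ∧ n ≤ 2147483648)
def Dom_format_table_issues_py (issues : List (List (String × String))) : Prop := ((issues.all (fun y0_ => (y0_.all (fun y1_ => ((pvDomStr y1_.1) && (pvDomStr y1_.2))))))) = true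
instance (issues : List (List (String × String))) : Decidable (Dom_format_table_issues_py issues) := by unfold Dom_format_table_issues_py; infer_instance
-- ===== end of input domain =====

-- B replaces A's three filter passes with one counting loop; same output, stated as exact equality.

-- shared helper: dict.get on an insertion-ordered association list (first match)
def pvGet (d : List (String × String)) (k : String) : Option String :=
  (d.find? (fun p => p.1 == k)).map (·.2)

-- ===== PORT A =====
def format_table_issues_py (issues : List (List (String × String))) : String :=
  if issues = [] then "" else
  let high := issues.filter (fun i => pvGet i "severity" == some "high")
  let med  := issues.filter (fun i => pvGet i "severity" == some "medium")
  let low  := issues.filter (fun i => pvGet i "severity" == some "low")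
  let lines : List String := ["## Tables & Figures Issues", "",
    "**Total Issues:** " ++ PySem.Int.toStr (issues.length : Int) ++ "\n"]
  let lines := if high ≠ [] then
      (lines ++ ["**High Severity:** " ++ PySem.Int.toStr (high.length : Int)]) ++
        (high.take 3).map (fun ex => "  - " ++ ((pvGet ex "description").getD "Unknown issue"))
    else lines
  let lines := if med ≠ [] then lines ++ ["**Medium Severity:** " ++ PySem.Int.toStr (med.length : Int)] else lines
  let lines := if low ≠ [] then lines ++ ["**Low Severity:** " ++ PySem.Int.toStr (low.length : Int)] else lines
  PySem.Str.join "\n" (lines ++ ["\n---\n"])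

-- ===== PORT B =====
-- one step of Source B's loop: state = (high, med, low, high_examples)
def pvAltStep (st : Nat × Nat × Nat × List String) (i : List (String × String)) :
    Nat × Nat × Nat × List String :=
  let s := pvGet i "severity"
  if s == some "high" then
    (st.1 + 1, st.2.1, st.2.2.1,
      if st.2.2.2.length < 3 then st.2.2.2 ++ [((pvGet i "description").getD "Unknown issue")]
      else st.2.2.2)
  else if s == some "medium" then (st.1, st.2.1 + 1, st.2.2.1, st.2.2.2)
  else if s == some "low" then (st.1, st.2.1, st.2.2.1 + 1, st.2.2.2)
  else st

def format_table_issues_py_alt (issues : List (List (String × String))) : String :=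
  if issues = [] then "" else
  let st := issues.foldl pvAltStep (0, 0, 0, [])
  let lines : List String := ["## Tables & Figures Issues", "",
    "**Total Issues:** " ++ PySem.Int.toStr (issues.length : Int) ++ "\n"]
  let lines := if st.1 ≠ 0 then
      (lines ++ ["**High Severity:** " ++ PySem.Int.toStr (st.1 : Int)]) ++
        st.2.2.2.map (fun d => "  - " ++ d)
    else lines
  let lines := if st.2.1 ≠ 0 then lines ++ ["**Medium Severity:** " ++ PySem.Int.toStr (st.2.1 : Int)] else lines
  let lines := if st.2.2.1 ≠ 0 then lines ++ ["**Low Severity:** " ++ PySem.Int.toStr (st.2.2.1 : Int)] else lines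
  PySem.Str.join "\n" (lines ++ ["\n---\n"])

-- ===== PRECONDITION & SPEC =====
def Spec_format_table_issues_py (issues : List (List (String × String))) (out : String) : Prop := out = format_table_issues_py_alt issues
instance (issues : List (List (String × String))) (out : String) : Decidable (Spec_format_table_issues_py issues out) := by unfold Spec_format_table_issues_py; infer_instance

-- ===== CLAIM (what is proved, stated in full; the proofs are below) =====
def Claim_equal_format_table_issues_py : Prop := ∀ (issues : List (List (String × String))), Dom_format_table_issues_py issues → Spec_format_table_issues_py issues (format_table_issues_py issues)

-- ===== LEMMAS AND PROOFS =====

lemma pvFold_spec (xs : List (List (String × String))) (h m l : Nat) (exs : List String) :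
    xs.foldl pvAltStep (h, m, l, exs) =
      (h + (xs.filter (fun i => pvGet i "severity" == some "high")).length,
       m + (xs.filter (fun i => pvGet i "severity" == some "medium")).length,
       l + (xs.filter (fun i => pvGet i "severity" == some "low")).length,
       exs ++ (((xs.filter (fun i => pvGet i "severity" == some "high")).take (3 - exs.length)).map
         (fun i => (pvGet i "description").getD "Unknown issue"))) := by
  induction xs generalizing h m l exs with
  | nil => simp
  | cons x rest ih =>
    simp only [List.foldl_cons, List.filter_cons]
    by_cases hh : pvGet x "severity" = some "high"
    · have hm : (pvGet x "severity" == some "medium") = false := by simp [hh]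
      have hl : (pvGet x "severity" == some "low") = false := by simp [hh]
      simp only [pvAltStep, hh]
      by_cases hlen : exs.length < 3
      · have h2 : 3 - (exs.length + 1) = 2 - exs.length := by omega
        have h3 : 3 - exs.length = (2 - exs.length) + 1 := by omega
        simp [ih, hlen, h2, h3, List.take_succ_cons]
        omega
      · have h3 : 3 - exs.length = 0 := by omega
        simp [ih, hlen, h3]
        omega
    · have hh' : (pvGet x "severity" == some "high") = false := by simp [hh]
      by_cases hm : pvGet x "severity" = some "medium"
      · have hl : (pvGet x "severity" == some "low") = false := by simp [hm]
        simp [pvAltStep, hm, ih]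
        omega
      · have hm' : (pvGet x "severity" == some "medium") = false := by simp [hm]
        by_cases hl : pvGet x "severity" = some "low"
        · simp [pvAltStep, hl, ih]
          omega
        · have hl' : (pvGet x "severity" == some "low") = false := by simp [hl]
          simp [pvAltStep, hh', hm', hl', ih]

-- ===== VERDICT (by name: the statement is the Claim_ definition above) =====
theorem format_table_issues_py_spec : Claim_equal_format_table_issues_py := by
  intro issues _
  unfold Spec_format_table_issues_py format_table_issues_py format_table_issues_py_alt
  by_cases hE : issues = []
  · simp [hE]
  · simp only [hE, if_false]
    rw [pvFold_spec]
    simp only [Nat.zero_add, List.nil_append, Nat.sub_zero, List.length_nil]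
    have hhigh : ((issues.filter (fun i => pvGet i "severity" == some "high")).length ≠ 0)
        ↔ (issues.filter (fun i => pvGet i "severity" == some "high")) ≠ [] := by
      simp [List.length_eq_zero_iff]
    have hmed : ((issues.filter (fun i => pvGet i "severity" == some "medium")).length ≠ 0)
        ↔ (issues.filter (fun i => pvGet i "severity" == some "medium")) ≠ [] := by
      simp [List.length_eq_zero_iff]
    have hlow : ((issues.filter (fun i => pvGet i "severity" == some "low")).length ≠ 0)
        ↔ (issues.filter (fun i => pvGet i "severity" == some "low")) ≠ [] := by
      simp [List.length_eq_zero_iff]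
    simp [hhigh, hmed, hlow, List.map_map, Function.comp_def]
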